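-- pv_equiv track=rewrite | github.com/lemontrr/Extended_BP_Framework | Optimizer_BPD.py | pre_emptive
-- ===== SOURCE A (Python) =====
-- def pre_emptive(S,D,y):
--     d = 999
--     for i in range(len(S)):
--         if S[i]^y in S:
--             j = S.index(S[i]^y)
--             if d > max(D[i],D[j]) + 1:
--                 d = max(D[i],D[j]) + 1
--     return y,d
-- ===== SOURCE B (Python) =====
-- def pre_emptive(S, D, y):
--     # Group the indices of S by value, then scan DISTINCT values only:
--     # for a value v all of whose occurrences pair with the same partner index
--     # j0 = first index of v^y, the best cost over the group is
--     # max(min(D[i] for occurrences i of v), D[j0]) + 1.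
--     occ = {}
--     for i, v in enumerate(S):
--         occ[v] = occ.get(v, []) + [i]
--     best = 999
--     for v, js in occ.items():
--         w = v ^ y
--         if w in occ:
--             c = max(min(D[i] for i in js), D[occ[w][0]]) + 1
--             if c < best:
--                 best = c
--     return y, best
-- ===== Notes on version B (the rewrite author's own statement) =====
-- stated objective: faster
-- what changed: B groups the indices of S by value in one dict pass and then minimizes over DISTINCT values only, using max(min of D over the group, D[first index of the XOR partner])+1 per group, instead of A's per-index scan with a linear membership test and S.index rescans.
import Mathlib
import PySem

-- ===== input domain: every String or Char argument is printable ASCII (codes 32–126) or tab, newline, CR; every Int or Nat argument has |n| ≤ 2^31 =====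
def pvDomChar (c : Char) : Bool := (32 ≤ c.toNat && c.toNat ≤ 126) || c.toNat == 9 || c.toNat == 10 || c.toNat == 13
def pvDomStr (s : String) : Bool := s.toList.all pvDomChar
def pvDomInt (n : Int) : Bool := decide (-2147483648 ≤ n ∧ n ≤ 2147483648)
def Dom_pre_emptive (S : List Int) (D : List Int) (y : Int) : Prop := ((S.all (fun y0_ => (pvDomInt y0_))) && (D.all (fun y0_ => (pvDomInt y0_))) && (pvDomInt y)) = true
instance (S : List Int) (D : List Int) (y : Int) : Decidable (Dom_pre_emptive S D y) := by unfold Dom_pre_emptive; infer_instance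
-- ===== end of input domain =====

-- B groups the indices of S by value in one dict pass and minimizes over DISTINCT
-- values (cost per group: max(min of D over the group, D[first index of the XOR
-- partner]) + 1), replacing A's per-index scan with membership test and S.index rescans.

-- ===== PORT A =====
def pre_emptive (S : List Int) (D : List Int) (y : Int) : Int × Int :=
  (y,
   (PySem.List.pyRange 0 (S.length : Int) 1).foldl (fun d i =>
      let x := PySem.Int.bxor (PySem.List.pyGetD S i 0) y
      if x ∈ S then
        let j : Int := ((PySem.List.index? S x).getD 0 : Nat)
        if d > max (PySem.List.pyGetD D i 0) (PySem.List.pyGetD D j 0) + 1 then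
          max (PySem.List.pyGetD D i 0) (PySem.List.pyGetD D j 0) + 1
        else d
      else d) 999)

-- ===== PORT B =====
-- occ[v] = occ.get(v, []) + [i]  over enumerate(S): indices of S grouped by value
def bOcc (S : List Int) : PySem.Dict Int (List Int) :=
  (PySem.List.enumerate S 0).foldl
    (fun d p => d.modify p.2 [] (· ++ [p.1])) PySem.Dict.empty

def pre_emptive_alt (S : List Int) (D : List Int) (y : Int) : Int × Int :=
  (y,
   (bOcc S).items.foldl (fun best q =>
      let w := PySem.Int.bxor q.1 y
      if (bOcc S).contains w then
        let m := (PySem.List.min? (q.2.map (fun i => PySem.List.pyGetD D i 0)) (fun x => x)).getD 0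
        let c := max m (PySem.List.pyGetD D (PySem.List.pyGetD ((bOcc S).getD w []) 0 0) 0) + 1
        if c < best then c else best
      else best) 999)

-- ===== PRECONDITION & SPEC =====
-- Pre_ excludes exactly the inputs on which A raises IndexError: an occurrence index i
-- whose XOR-partner test fires (so D[i] and D[first index of the partner] are read)
-- but which is out of range of D.
def Pre_pre_emptive (S : List Int) (D : List Int) (y : Int) : Prop :=
  ∀ p ∈ PySem.List.enumerate S 0, (PySem.Int.bxor p.2 y) ∈ S →
    p.1 < (D.length : Int) ∧
    ∀ j ∈ PySem.List.index? S (PySem.Int.bxor p.2 y), j < D.length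
instance (S : List Int) (D : List Int) (y : Int) : Decidable (Pre_pre_emptive S D y) := by
  unfold Pre_pre_emptive; infer_instance
def pvWitness_pre_emptive : List Int × List Int × Int := ([1, 2], [0, 0], 3)

def Spec_pre_emptive (S : List Int) (D : List Int) (y : Int) (out : Int × Int) : Prop := out = pre_emptive_alt S D y
instance (S : List Int) (D : List Int) (y : Int) (out : Int × Int) : Decidable (Spec_pre_emptive S D y out) := by unfold Spec_pre_emptive; infer_instance

-- ===== CLAIM (what is proved, stated in full; the proofs are below) =====
def Claim_equal_pre_emptive : Prop := ∀ (S : List Int) (D : List Int) (y : Int), Dom_pre_emptive S D y → Pre_pre_emptive S D y → Spec_pre_emptive S D y (pre_emptive S D y)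

-- ===== LEMMAS AND PROOFS =====

-- the indices at which v occurs in S, in order (B's occ[v])
def Gset (S : List Int) (v : Int) : List Int :=
  ((PySem.List.enumerate S 0).filter (fun p => p.2 == v)).map (·.1)

-- A's cost of one index/value pair
def costA (S D : List Int) (y : Int) (p : Int × Int) : Int :=
  max (PySem.List.pyGetD D p.1 0)
      (PySem.List.pyGetD D (((PySem.List.index? S (PySem.Int.bxor p.2 y)).getD 0 : Nat) : Int) 0) + 1

-- B's cost of one value group
def costB (S D : List Int) (y : Int) (v : Int) : Int :=
  max ((PySem.List.min? ((Gset S v).map (fun i => PySem.List.pyGetD D i 0)) (fun x => x)).getD 0)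
      (PySem.List.pyGetD D (PySem.List.pyGetD (Gset S (PySem.Int.bxor v y)) 0 0) 0) + 1

-- foldl-min only depends on lists up to mutual lower bounds
theorem foldl_min_le_foldl_min (a : Int) (l1 l2 : List Int)
    (h : ∀ z ∈ l2, ∃ x ∈ l1, x ≤ z) : l1.foldl min a ≤ l2.foldl min a := by
  rcases PySem.List.foldl_min_mem l2 a with h2 | h2
  · rw [h2]; exact (PySem.List.foldl_min_le l1 a).1
  · obtain ⟨x, hx, hxle⟩ := h _ h2
    exact le_trans ((PySem.List.foldl_min_le l1 a).2 x hx) hxle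

theorem mem_Gset (S : List Int) (i v : Int) :
    i ∈ Gset S v ↔ (i, v) ∈ PySem.List.enumerate S 0 := by
  unfold Gset
  simp only [List.mem_map, List.mem_filter, beq_iff_eq]
  constructor
  · rintro ⟨p, ⟨hpE, hpv⟩, hpi⟩
    have : p = (i, v) := Prod.ext hpi hpv
    rwa [this] at hpE
  · intro h; exact ⟨(i, v), ⟨h, rfl⟩, rfl⟩

theorem Gset_first_aux : ∀ (S : List Int) (s w : Int) (k : Nat),
    PySem.List.index? S w = some k →
    ∃ rest, ((PySem.List.enumerate S s).filter (fun p => p.2 == w)).map (·.1)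
      = (s + (k : Int)) :: rest := by
  intro S
  induction S with
  | nil => intro s w k h; simp [PySem.List.index?_eq_idxOf?] at h
  | cons v S ih =>
    intro s w k h
    rw [PySem.List.enumerate_cons]
    by_cases hv : v = w
    · subst hv
      rw [PySem.List.index?_cons_self] at h
      injection h with hk
      subst hk
      refine ⟨((PySem.List.enumerate S (s + 1)).filter (fun p => p.2 == v)).map (·.1), ?_⟩
      simp
    · rw [PySem.List.index?_cons_of_ne S hv] at h
      cases hidx : PySem.List.index? S w with
      | none => rw [hidx] at h; exact absurd h (by simp)
      | some k' =>
        rw [hidx] at h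
        simp only [Option.map_some, Option.some.injEq] at h
        obtain ⟨rest, hr⟩ := ih (s + 1) w k' hidx
        refine ⟨rest, ?_⟩
        rw [List.filter_cons]
        have hcond : (((s, v).2 == w)) = false := by simp [hv]
        simp only [hcond, Bool.false_eq_true, if_false]
        rw [hr, ← h]
        congr 1
        push_cast
        ring

theorem Gset_first (S : List Int) (w : Int) (k : Nat)
    (h : PySem.List.index? S w = some k) :
    ∃ rest, Gset S w = ((k : Int)) :: rest := by
  obtain ⟨rest, hr⟩ := Gset_first_aux S 0 w k h
  exact ⟨rest, by unfold Gset; rw [hr, zero_add]⟩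

theorem pyGetD_Gset_first (S : List Int) (w : Int) (k : Nat)
    (h : PySem.List.index? S w = some k) :
    PySem.List.pyGetD (Gset S w) 0 0 = (k : Int) := by
  obtain ⟨rest, hr⟩ := Gset_first S w k h
  rw [hr, PySem.List.pyGetD_zero_cons]

-- characterization of B's dict
theorem bOcc_getD (S : List Int) (v : Int) : (bOcc S).getD v [] = Gset S v := by
  unfold bOcc Gset
  have hfold : (PySem.List.enumerate S 0).foldl
        (fun (d : PySem.Dict Int (List Int)) p => d.modify p.2 [] (· ++ [p.1])) PySem.Dict.empty
      = ((PySem.List.enumerate S 0).map Prod.swap).foldl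
        (fun d q => d.modify q.1 [] (· ++ [q.2])) PySem.Dict.empty := by
    rw [List.foldl_map]
    rfl
  rw [hfold, PySem.Dict.getD_foldl_modify_append]
  simp [List.filter_map, Function.comp_def, Prod.swap, List.map_map]

theorem bOcc_keys (S : List Int) : (bOcc S).keys = PySem.Set.ofList S := by
  unfold bOcc
  rw [PySem.Dict.keys_foldl_modify_key]
  simp [PySem.Dict.keys_empty, PySem.Set.update, PySem.Set.ofList_eq_foldl,
    PySem.List.map_snd_enumerate]

theorem bOcc_nodup (S : List Int) : (bOcc S).keys.Nodup := by
  rw [bOcc_keys]; exact PySem.Set.nodup_ofList S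

theorem bOcc_items (S : List Int) :
    (bOcc S).items = (PySem.Set.ofList S).map (fun v => (v, Gset S v)) := by
  rw [PySem.Dict.items_eq_map_keys _ (bOcc_nodup S) ([] : List Int), bOcc_keys]
  exact List.map_congr_left (fun v _ => by rw [bOcc_getD])

theorem bOcc_contains (S : List Int) (w : Int) :
    (bOcc S).contains w = decide (w ∈ S) := by
  rw [PySem.Dict.contains_eq_decide_mem_keys, bOcc_keys]
  simp [PySem.Set.mem_ofList]

-- A's result as a foldl-min over per-index costs
theorem A_char (S D : List Int) (y : Int) :
    (pre_emptive S D y).2 =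
      (((PySem.List.enumerate S 0).filter
          (fun p => decide (PySem.Int.bxor p.2 y ∈ S))).map (costA S D y)).foldl min 999 := by
  unfold pre_emptive
  simp only
  have hrange : PySem.List.pyRange 0 (S.length : Int) 1
      = (PySem.List.enumerate S 0).map (·.1) := by
    rw [PySem.List.map_fst_enumerate]; norm_num
  rw [hrange, List.foldl_map]
  have hcongr : (PySem.List.enumerate S 0).foldl
      (fun d p =>
        let x := PySem.Int.bxor (PySem.List.pyGetD S p.1 0) y
        if x ∈ S then
          let j : Int := ((PySem.List.index? S x).getD 0 : Nat)
          if d > max (PySem.List.pyGetD D p.1 0) (PySem.List.pyGetD D j 0) + 1 then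
            max (PySem.List.pyGetD D p.1 0) (PySem.List.pyGetD D j 0) + 1
          else d
        else d) 999
      = (PySem.List.enumerate S 0).foldl
        (fun d p => if PySem.Int.bxor p.2 y ∈ S then min d (costA S D y p) else d) 999 := by
    apply PySem.List.foldl_congr_mem
    intro d p hp
    obtain ⟨k, hk, hpk⟩ := (PySem.List.mem_enumerate_iff _ _ _).1 hp
    have hfst : PySem.List.pyGetD S p.1 0 = p.2 := by
      rw [hpk]; simp [PySem.List.pyGetD_natCast, List.getElem?_eq_getElem hk]
    dsimp only
    rw [hfst]
    unfold costA
    by_cases hmem : PySem.Int.bxor p.2 y ∈ S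
    · simp only [hmem, if_true]
      rw [min_def]
      split_ifs <;> omega
    · simp [hmem]
  rw [hcongr, PySem.List.foldl_ite_eq_foldl_filter, ← List.foldl_map]

-- B's result as a foldl-min over per-group costs
theorem B_char (S D : List Int) (y : Int) :
    (pre_emptive_alt S D y).2 =
      (((PySem.Set.ofList S).filter
          (fun v => decide (PySem.Int.bxor v y ∈ S))).map (costB S D y)).foldl min 999 := by
  unfold pre_emptive_alt
  simp only
  rw [bOcc_items, List.foldl_map]
  have hcongr : (PySem.Set.ofList S).foldl
      (fun best v =>
        let w := PySem.Int.bxor v y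
        if (bOcc S).contains w then
          let m := (PySem.List.min? ((Gset S v).map (fun i => PySem.List.pyGetD D i 0)) (fun x => x)).getD 0
          let c := max m (PySem.List.pyGetD D (PySem.List.pyGetD ((bOcc S).getD w []) 0 0) 0) + 1
          if c < best then c else best
        else best) 999
      = (PySem.Set.ofList S).foldl
        (fun best v => if PySem.Int.bxor v y ∈ S then min best (costB S D y v) else best) 999 := by
    apply PySem.List.foldl_congr_mem
    intro best v _
    dsimp only
    rw [bOcc_contains, bOcc_getD]
    unfold costB
    by_cases hmem : PySem.Int.bxor v y ∈ S
    · simp only [hmem, decide_true, if_true]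
      rw [min_def]
      split_ifs <;> omega
    · simp [hmem]
  rw [hcongr, PySem.List.foldl_ite_eq_foldl_filter, ← List.foldl_map]

-- per valid value v, B's group cost equals A's cost at the group's D-minimizing index
theorem costB_eq_costA_min (S D : List Int) (y : Int) (v : Int) (hv : v ∈ S)
    (hw : PySem.Int.bxor v y ∈ S) :
    ∃ i ∈ Gset S v, costB S D y v = costA S D y (i, v) ∧
      ∀ i' ∈ Gset S v, costB S D y v ≤ costA S D y (i', v) := by
  obtain ⟨kv, hkv⟩ := Option.isSome_iff_exists.1
    ((PySem.List.index?_isSome_iff S v).2 hv)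
  obtain ⟨kw, hkw⟩ := Option.isSome_iff_exists.1
    ((PySem.List.index?_isSome_iff S (PySem.Int.bxor v y)).2 hw)
  obtain ⟨rest, hG⟩ := Gset_first S v kv hkv
  -- the second (partner) argument coincides in costA and costB
  have hK : PySem.List.pyGetD D (PySem.List.pyGetD (Gset S (PySem.Int.bxor v y)) 0 0) 0
      = PySem.List.pyGetD D (((PySem.List.index? S (PySem.Int.bxor v y)).getD 0 : Nat) : Int) 0 := by
    rw [pyGetD_Gset_first S _ kw hkw, hkw]
    simp
  -- the group minimum is the running min over the group's D-values
  have hmin : (PySem.List.min? ((Gset S v).map (fun i => PySem.List.pyGetD D i 0)) (fun x => x)).getD 0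
      = (rest.map (fun i => PySem.List.pyGetD D i 0)).foldl min (PySem.List.pyGetD D (kv : Int) 0) := by
    rw [hG]
    simp only [List.map_cons]
    rw [PySem.List.min?_id_cons]
    simp
  -- the group minimum is attained at some index of the group
  have hattained : ∃ i ∈ Gset S v, PySem.List.pyGetD D i 0
      = (rest.map (fun i => PySem.List.pyGetD D i 0)).foldl min (PySem.List.pyGetD D (kv : Int) 0) := by
    rcases PySem.List.foldl_min_mem (rest.map (fun i => PySem.List.pyGetD D i 0))
        (PySem.List.pyGetD D (kv : Int) 0) with h | h
    · exact ⟨(kv : Int), by rw [hG]; exact List.mem_cons_self, h.symm⟩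
    · obtain ⟨i, hi, hieq⟩ := List.mem_map.1 h
      exact ⟨i, by rw [hG]; exact List.mem_cons_of_mem _ hi, hieq⟩
  -- and it bounds every group member's D-value from below
  have hlb : ∀ i' ∈ Gset S v,
      (rest.map (fun i => PySem.List.pyGetD D i 0)).foldl min (PySem.List.pyGetD D (kv : Int) 0)
        ≤ PySem.List.pyGetD D i' 0 := by
    intro i' hi'
    rw [hG] at hi'
    rcases List.mem_cons.1 hi' with h | h
    · subst h
      exact (PySem.List.foldl_min_le _ _).1
    · exact (PySem.List.foldl_min_le _ _).2 _ (List.mem_map_of_mem h)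
  obtain ⟨i, hiG, hiD⟩ := hattained
  refine ⟨i, hiG, ?_, ?_⟩
  · unfold costB costA
    rw [hK, hmin]
    dsimp only
    rw [hiD]
  · intro i' hi'
    unfold costB costA
    rw [hK, hmin]
    dsimp only
    have h2 := max_le_max (hlb i' hi')
      (le_refl (PySem.List.pyGetD D (((PySem.List.index? S (PySem.Int.bxor v y)).getD 0 : Nat) : Int) 0))
    linarith

-- ===== VERDICT (by name: the statement is the Claim_ definition above) =====
theorem pre_emptive_spec : Claim_equal_pre_emptive := by
  intro S D y _ _
  unfold Spec_pre_emptive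
  have hfst : (pre_emptive S D y).1 = (pre_emptive_alt S D y).1 := rfl
  have hsnd : (pre_emptive S D y).2 = (pre_emptive_alt S D y).2 := by
    rw [A_char, B_char]
    apply le_antisymm
    · -- fold over CA ≤ fold over CB: each CB element has an equal CA element
      apply foldl_min_le_foldl_min
      intro z hz
      obtain ⟨v, hvf, hvz⟩ := List.mem_map.1 hz
      obtain ⟨hvS, hvd⟩ := List.mem_filter.1 hvf
      have hvS' : v ∈ S := (PySem.Set.mem_ofList S v).1 hvS
      have hw : PySem.Int.bxor v y ∈ S := of_decide_eq_true hvd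
      obtain ⟨i, hiG, heq, _⟩ := costB_eq_costA_min S D y v hvS' hw
      refine ⟨costA S D y (i, v), ?_, by rw [← hvz, heq]⟩
      apply List.mem_map_of_mem
      exact List.mem_filter.2 ⟨(mem_Gset S i v).1 hiG, by simpa using hw⟩
    · -- fold over CB ≤ fold over CA: each CA element is ≥ its group's CB element
      apply foldl_min_le_foldl_min
      intro x hx
      obtain ⟨p, hpf, hpx⟩ := List.mem_map.1 hx
      obtain ⟨hpE, hpd⟩ := List.mem_filter.1 hpf
      have hw : PySem.Int.bxor p.2 y ∈ S := of_decide_eq_true hpd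
      have hvS : p.2 ∈ S := by
        have := List.mem_map_of_mem (f := fun q : Int × Int => q.2) hpE
        rwa [PySem.List.map_snd_enumerate] at this
      obtain ⟨_, _, _, hub⟩ := costB_eq_costA_min S D y p.2 hvS hw
      refine ⟨costB S D y p.2, ?_, ?_⟩
      · apply List.mem_map_of_mem
        exact List.mem_filter.2 ⟨(PySem.Set.mem_ofList S p.2).2 hvS, by simpa using hw⟩
      · rw [← hpx]
        have hpG : p.1 ∈ Gset S p.2 := (mem_Gset S p.1 p.2).2 (by rwa [Prod.mk.eta])
        have := hub p.1 hpG
        rwa [Prod.mk.eta] at this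
  exact Prod.ext hfst hsnd
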